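-- pv_equiv track=rewrite | github.com/wggraham/interview-prep | interviewbit/Stacks&Queues/maxspprod.py | maxSpecialProduct
-- ===== SOURCE A (Python) =====
-- def maxSpecialProduct(A):
--     def set_special(i, nums, s, special):
--         while s and nums[s[-1]] <= nums[i]:
--             s.pop()
--         special[i] *= s[-1] if s else 0
--         s.append(i)
--
--     s, res = [], [1] * len(A)
--     for i in range(len(A)):
--         set_special(i, A, s, res)
--     s = []
--     for i in reversed(range(len(A))):
--         set_special(i, A, s, res)
--
--     return max(res) % ((10**9) + 7)
-- ===== SOURCE B (Python) =====
-- def maxSpecialProduct(A):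
--     # Direct double scan: nearest strictly greater index on each side (0 if none).
--     MOD = 10**9 + 7
--     n = len(A)
--     res = []
--     for i in range(n):
--         left = 0
--         for j in range(i - 1, -1, -1):
--             if A[j] > A[i]:
--                 left = j
--                 break
--         right = 0
--         for k in range(i + 1, n):
--             if A[k] > A[i]:
--                 right = k
--                 break
--         res.append(left * right)
--     return max(res) % MOD
-- ===== Notes on version B (the rewrite author's own statement) =====
-- stated objective: simpler
-- what changed: Replaces the two shared-state monotonic-stack passes (with an index-mutating helper) by a direct per-index scan: for each i find the nearest strictly greater neighbour index on each side (0 if none) and take the max of the products; plainer but O(n^2) instead of O(n).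
import Mathlib
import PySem

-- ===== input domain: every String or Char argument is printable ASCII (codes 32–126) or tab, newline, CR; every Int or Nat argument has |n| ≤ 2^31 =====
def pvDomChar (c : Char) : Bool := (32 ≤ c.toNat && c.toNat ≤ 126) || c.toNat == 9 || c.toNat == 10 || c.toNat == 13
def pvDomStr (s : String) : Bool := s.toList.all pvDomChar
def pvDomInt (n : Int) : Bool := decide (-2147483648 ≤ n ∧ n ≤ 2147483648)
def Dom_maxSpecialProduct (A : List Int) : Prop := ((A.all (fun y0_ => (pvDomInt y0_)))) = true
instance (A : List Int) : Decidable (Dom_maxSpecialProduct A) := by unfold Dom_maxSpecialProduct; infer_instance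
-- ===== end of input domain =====

-- B replaces the two monotonic-stack passes by a direct per-index neighbour scan: simpler, though O(n^2).

-- ===== PORT A =====
-- while s and nums[s[-1]] <= nums[i]: s.pop()   (stack head = Python s[-1], the top;
-- every stacked index is in range, so List.getD is exact for nums[t])
def popLoop (nums : List Int) (x : Int) : List Nat → List Nat
  | [] => []
  | t :: rest => if nums.getD t 0 ≤ x then popLoop nums x rest else t :: rest

-- set_special: pop, multiply special[i] by top-or-0, push i (i is in range, so getD/set are exact)
def setSpecial (i : Nat) (nums : List Int) (s : List Nat) (special : List Int) :
    List Nat × List Int :=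
  let s' := popLoop nums (nums.getD i 0) s
  (i :: s', special.set i (special.getD i 0 * (match s' with | [] => (0 : Int) | t :: _ => (t : Int))))

def maxSpecialProduct (A : List Int) : Int :=
  let n := A.length
  let p1 := (List.range n).foldl (fun st i => setSpecial i A st.1 st.2) ([], List.replicate n (1 : Int))
  let p2 := ((List.range n).reverse).foldl (fun st i => setSpecial i A st.1 st.2) ([], p1.2)
  PySem.Int.mod ((PySem.List.max? p2.2 (fun x => x)).getD 0) (10 ^ 9 + 7)

-- ===== PORT B =====
-- for j in range(i-1, -1, -1): first j with A[j] > A[i], else 0 (argument = number of candidates below i)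
def findLeft (A : List Int) (x : Int) : Nat → Nat
  | 0 => 0
  | j + 1 => if A.getD j 0 > x then j else findLeft A x j

-- for k in range(i+1, n): first k with A[k] > A[i], else 0 (argument = the candidate index list)
def findRight (A : List Int) (x : Int) : List Nat → Nat
  | [] => 0
  | k :: rest => if A.getD k 0 > x then k else findRight A x rest

def maxSpecialProduct_alt (A : List Int) : Int :=
  let n := A.length
  let res := (List.range n).map (fun i =>
    ((findLeft A (A.getD i 0) i : Int)) * ((findRight A (A.getD i 0) (List.range' (i + 1) (n - (i + 1))) : Int)))
  PySem.Int.mod ((PySem.List.max? res (fun x => x)).getD 0) (10 ^ 9 + 7)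

-- ===== PRECONDITION & SPEC =====
-- Pre_ excludes only the empty list, on which Python's max(res) raises ValueError.
def Pre_maxSpecialProduct (A : List Int) : Prop := A ≠ []
instance (A : List Int) : Decidable (Pre_maxSpecialProduct A) := by unfold Pre_maxSpecialProduct; infer_instance
def pvWitness_maxSpecialProduct : List Int := [3, 1, 2]

def Spec_maxSpecialProduct (A : List Int) (out : Int) : Prop := out = maxSpecialProduct_alt A
instance (A : List Int) (out : Int) : Decidable (Spec_maxSpecialProduct A out) := by unfold Spec_maxSpecialProduct; infer_instance

-- ===== CLAIM (what is proved, stated in full; the proofs are below) =====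
def Claim_equal_maxSpecialProduct : Prop := ∀ (A : List Int), Dom_maxSpecialProduct A → Pre_maxSpecialProduct A → Spec_maxSpecialProduct A (maxSpecialProduct A)

-- ===== LEMMAS AND PROOFS =====

-- stack after processing the indices of `rev` (most recently processed first)
def stk (A : List Int) : List Nat → List Nat
  | [] => []
  | i :: rest => i :: popLoop A (A.getD i 0) (stk A rest)

theorem popLoop_popLoop (A : List Int) (x y : Int) (h : y ≤ x) :
    ∀ l : List Nat, popLoop A x (popLoop A y l) = popLoop A x l := by
  intro l
  induction l with
  | nil => rfl
  | cons t rest ih =>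
    show popLoop A x (if A.getD t 0 ≤ y then popLoop A y rest else t :: rest)
      = if A.getD t 0 ≤ x then popLoop A x rest else t :: rest
    by_cases ht : A.getD t 0 ≤ y
    · rw [if_pos ht, if_pos (le_trans ht h)]
      exact ih
    · rw [if_neg ht]
      rfl

theorem head_pop_stk (A : List Int) (x : Int) :
    ∀ rev : List Nat,
      (match popLoop A x (stk A rev) with | [] => (0 : Int) | t :: _ => (t : Int))
        = (findRight A x rev : Int) := by
  intro rev
  induction rev with
  | nil => rfl
  | cons i rest ih =>
    have hstk : stk A (i :: rest) = i :: popLoop A (A.getD i 0) (stk A rest) := rfl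
    have hpop : ∀ l : List Nat,
        popLoop A x (i :: l) = if A.getD i 0 ≤ x then popLoop A x l else i :: l := fun _ => rfl
    have hfr : findRight A x (i :: rest)
        = if A.getD i 0 > x then i else findRight A x rest := rfl
    by_cases hi : A.getD i 0 ≤ x
    · rw [hstk, hpop, if_pos hi, popLoop_popLoop A x (A.getD i 0) hi, hfr,
        if_neg (not_lt.mpr hi)]
      exact ih
    · rw [hstk, hpop, if_neg hi, hfr, if_pos (lt_of_not_ge hi)]

theorem setSpecial_stk (A : List Int) (i : Nat) (rev : List Nat) (res : List Int) :
    setSpecial i A (stk A rev) res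
      = (stk A (i :: rev), res.set i (res.getD i 0 * (findRight A (A.getD i 0) rev : Int))) := by
  show (i :: popLoop A (A.getD i 0) (stk A rev),
      res.set i (res.getD i 0 *
        (match popLoop A (A.getD i 0) (stk A rev) with | [] => (0 : Int) | t :: _ => (t : Int))))
    = _
  rw [head_pop_stk]
  rfl

theorem findLeft_eq (A : List Int) (x : Int) :
    ∀ i : Nat, findRight A x ((List.range i).reverse) = findLeft A x i := by
  intro i
  induction i with
  | zero => rfl
  | succ j ih =>
    rw [List.range_succ, List.reverse_append, List.reverse_singleton, List.singleton_append]
    show (if A.getD j 0 > x then j else findRight A x ((List.range j).reverse))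
      = if A.getD j 0 > x then j else findLeft A x j
    rw [ih]

theorem getD_map_range_lt (n m : Nat) (g : Nat → Int) (hm : m < n) :
    (((List.range n).map g).getD m 0) = g m := by
  rw [List.getD_eq_getElem _ _ (by simpa using hm)]
  simp

theorem set_map_range (n m : Nat) (g : Nat → Int) (v : Int) (hm : m < n) :
    ((List.range n).map g).set m v = (List.range n).map (fun i => if i = m then v else g i) := by
  apply List.ext_getElem
  · simp
  · intro k h1 h2
    simp only [List.getElem_set, List.getElem_map, List.getElem_range]
    by_cases hk : m = k
    · subst hk; simp
    · rw [if_neg hk, if_neg (fun h => hk h.symm)]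

theorem leftPass (A : List Int) :
    ∀ m : Nat, m ≤ A.length →
      (List.range m).foldl (fun st i => setSpecial i A st.1 st.2)
          ([], List.replicate A.length (1 : Int))
        = (stk A ((List.range m).reverse),
           (List.range A.length).map
             (fun i => if i < m then (findLeft A (A.getD i 0) i : Int) else 1)) := by
  intro m
  induction m with
  | zero =>
    intro _
    simp [stk, List.map_const']
  | succ m ih =>
    intro hm'
    have hm' : m < A.length := hm'
    rw [List.range_succ, List.foldl_append, ih (le_of_lt hm')]
    simp only [List.foldl_cons, List.foldl_nil]
    rw [setSpecial_stk, findLeft_eq, List.reverse_append, List.reverse_singleton,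
      List.singleton_append, Prod.mk.injEq]
    refine ⟨rfl, ?_⟩
    rw [getD_map_range_lt _ _ _ hm', if_neg (lt_irrefl m), set_map_range _ _ _ _ hm']
    apply List.map_congr_left
    intro i hi
    by_cases h : i = m
    · subst h; simp
    · have h2 : (i < m + 1) ↔ (i < m) := by omega
      simp [h, h2]

theorem rightPass (A : List Int) :
    ∀ k : Nat, k ≤ A.length →
      ((List.range k).reverse).foldl (fun st i => setSpecial i A st.1 st.2)
          (stk A (List.range' k (A.length - k)),
           (List.range A.length).map
             (fun i => if k ≤ i then
                 (findLeft A (A.getD i 0) i : Int)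
                   * (findRight A (A.getD i 0) (List.range' (i + 1) (A.length - (i + 1))) : Int)
               else (findLeft A (A.getD i 0) i : Int)))
        = (stk A (List.range' 0 A.length),
           (List.range A.length).map
             (fun i =>
                 (findLeft A (A.getD i 0) i : Int)
                   * (findRight A (A.getD i 0) (List.range' (i + 1) (A.length - (i + 1))) : Int))) := by
  intro k
  induction k with
  | zero =>
    intro _
    simp only [List.range_zero, List.reverse_nil, List.foldl_nil, Nat.sub_zero, Prod.mk.injEq]
    refine ⟨by trivial, ?_⟩
    apply List.map_congr_left
    intro i _
    rw [if_pos (Nat.zero_le i)]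
  | succ k ih =>
    intro hk
    have hk' : k < A.length := hk
    rw [List.range_succ, List.reverse_append, List.reverse_singleton, List.singleton_append,
      List.foldl_cons, setSpecial_stk]
    have hcons : (k :: List.range' (k + 1) (A.length - (k + 1))) = List.range' k (A.length - k) := by
      have h : A.length - k = (A.length - (k + 1)) + 1 := by omega
      rw [h, List.range'_succ]
    have hset :
        ((List.range A.length).map
          (fun i => if k + 1 ≤ i then
              (findLeft A (A.getD i 0) i : Int)
                * (findRight A (A.getD i 0) (List.range' (i + 1) (A.length - (i + 1))) : Int)
            else (findLeft A (A.getD i 0) i : Int))).set k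
          (((List.range A.length).map
            (fun i => if k + 1 ≤ i then
                (findLeft A (A.getD i 0) i : Int)
                  * (findRight A (A.getD i 0) (List.range' (i + 1) (A.length - (i + 1))) : Int)
              else (findLeft A (A.getD i 0) i : Int))).getD k 0
            * (findRight A (A.getD k 0) (List.range' (k + 1) (A.length - (k + 1))) : Int))
        = (List.range A.length).map
            (fun i => if k ≤ i then
                (findLeft A (A.getD i 0) i : Int)
                  * (findRight A (A.getD i 0) (List.range' (i + 1) (A.length - (i + 1))) : Int)
              else (findLeft A (A.getD i 0) i : Int)) := by
      rw [getD_map_range_lt _ _ _ hk', if_neg (by omega), set_map_range _ _ _ _ hk']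
      apply List.map_congr_left
      intro i hi
      by_cases h : i = k
      · subst h; simp
      · have h2 : (k + 1 ≤ i) ↔ (k ≤ i) := by omega
        simp [h, h2]
    rw [hset, hcons]
    exact ih (le_of_lt hk')

theorem res_final (A : List Int) :
    (((List.range A.length).reverse).foldl (fun st i => setSpecial i A st.1 st.2)
        ([], ((List.range A.length).foldl (fun st i => setSpecial i A st.1 st.2)
          ([], List.replicate A.length (1 : Int))).2)).2
      = (List.range A.length).map
          (fun i =>
              (findLeft A (A.getD i 0) i : Int)
                * (findRight A (A.getD i 0) (List.range' (i + 1) (A.length - (i + 1))) : Int)) := by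
  rw [leftPass A A.length le_rfl]
  have hstart :
      (([] : List Nat),
        (stk A ((List.range A.length).reverse),
         (List.range A.length).map
           (fun i => if i < A.length then (findLeft A (A.getD i 0) i : Int) else 1)).2)
      = (stk A (List.range' A.length (A.length - A.length)),
         (List.range A.length).map
           (fun i => if A.length ≤ i then
               (findLeft A (A.getD i 0) i : Int)
                 * (findRight A (A.getD i 0) (List.range' (i + 1) (A.length - (i + 1))) : Int)
             else (findLeft A (A.getD i 0) i : Int))) := by
    rw [Prod.mk.injEq]
    constructor
    · have h0 : List.range' A.length (A.length - A.length) = [] := by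
        rw [Nat.sub_self, List.range'_zero]
      rw [h0]
      rfl
    · apply List.map_congr_left
      intro i hi
      have h1 : i < A.length := List.mem_range.mp hi
      rw [if_pos h1, if_neg (by omega)]
  rw [hstart, rightPass A A.length le_rfl]

-- ===== VERDICT (by name: the statement is the Claim_ definition above) =====
theorem maxSpecialProduct_spec : Claim_equal_maxSpecialProduct := by
  intro A _ _
  show maxSpecialProduct A = maxSpecialProduct_alt A
  show PySem.Int.mod
      ((PySem.List.max?
        (((List.range A.length).reverse).foldl (fun st i => setSpecial i A st.1 st.2)
          ([], ((List.range A.length).foldl (fun st i => setSpecial i A st.1 st.2)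
            ([], List.replicate A.length (1 : Int))).2)).2 (fun x => x)).getD 0) (10 ^ 9 + 7)
    = PySem.Int.mod
      ((PySem.List.max?
        ((List.range A.length).map (fun i =>
          ((findLeft A (A.getD i 0) i : Int))
            * ((findRight A (A.getD i 0) (List.range' (i + 1) (A.length - (i + 1))) : Int))))
        (fun x => x)).getD 0) (10 ^ 9 + 7)
  rw [res_final]
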